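-- pv_equiv track=rewrite | github.com/felixseriksson/competitive | codejamqual20/ESAbATAd/ESAbATAd5.py | vilkensortspar
-- ===== SOURCE A (Python) =====
-- def vilkensortspar(lista):
--     assym = [None, None]
--     sym = [None, None]
--     for i in range(len(lista)//2):
--         if lista[i] == None:
--             continue
--         if lista[i] == lista[-(i+1)]:
--             sym = [i, len(lista)-(i+1)]
--         else:
--             assym = [i, len(lista)-(i+1)]
--     return sym, assym # index på de symmetriska/assymmetriska paren
-- ===== SOURCE B (Python) =====
-- def vilkensortspar(lista):
--     n = len(lista)
--     pairs = list(zip(lista, reversed(lista)))[:n//2]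
--     matches = [i for i, (a, b) in enumerate(pairs) if a != None and a == b]
--     mismatches = [i for i, (a, b) in enumerate(pairs) if a != None and a != b]
--     sym = [matches[-1], n - 1 - matches[-1]] if matches else [None, None]
--     assym = [mismatches[-1], n - 1 - mismatches[-1]] if mismatches else [None, None]
--     return sym, assym
-- ===== Notes on version B (the rewrite author's own statement) =====
-- stated objective: alternative
-- what changed: B replaces A's single stateful overwrite loop by staged passes: zip the list with its reverse, truncate to the first half, build the index lists of matching and mismatching non-None pairs by comprehensions, and read off the last element of each list.
import Mathlib
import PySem

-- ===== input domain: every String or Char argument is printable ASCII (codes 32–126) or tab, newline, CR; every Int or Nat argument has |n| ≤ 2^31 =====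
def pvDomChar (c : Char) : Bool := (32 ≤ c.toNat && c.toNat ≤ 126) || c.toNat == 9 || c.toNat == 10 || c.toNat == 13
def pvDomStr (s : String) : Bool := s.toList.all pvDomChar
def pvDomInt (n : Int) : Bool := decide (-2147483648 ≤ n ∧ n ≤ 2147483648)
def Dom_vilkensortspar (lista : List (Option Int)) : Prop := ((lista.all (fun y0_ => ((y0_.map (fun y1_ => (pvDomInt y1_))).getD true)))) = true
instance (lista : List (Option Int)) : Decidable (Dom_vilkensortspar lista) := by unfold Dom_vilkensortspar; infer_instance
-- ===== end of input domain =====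

-- B computes the same result by staged passes (zip with the reverse, two filtered index lists, take the last) instead of A's stateful overwrite loop (alternative decomposition, same cost).

-- ===== PORT A =====
def vilkensortspar (lista : List (Option Int)) : List (Option Int) × List (Option Int) :=
  (PySem.List.pyRange 0 (PySem.Int.floordiv (lista.length : Int) 2) 1).foldl
    (fun (st : List (Option Int) × List (Option Int)) i =>
      match PySem.List.pyGet? lista i with
      | none => st                                     -- unreachable: i is always in range
      | some x =>
        if x = none then st
        else if some x = PySem.List.pyGet? lista (-(i+1)) then
          ([some i, some ((lista.length : Int)-(i+1))], st.2)
        else (st.1, [some i, some ((lista.length : Int)-(i+1))]))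
    ([none, none], [none, none])

-- ===== PORT B =====
def vilkensortspar_alt (lista : List (Option Int)) : List (Option Int) × List (Option Int) :=
  let n : Int := (lista.length : Int)
  let pairs := PySem.List.slice (lista.zip lista.reverse) none (some (PySem.Int.floordiv n 2))
  let matchIdxs := (PySem.List.enumerate pairs 0).filterMap
      (fun p => if p.2.1 ≠ none ∧ p.2.1 = p.2.2 then some p.1 else none)
  let mismIdxs := (PySem.List.enumerate pairs 0).filterMap
      (fun p => if p.2.1 ≠ none ∧ p.2.1 ≠ p.2.2 then some p.1 else none)
  let sym := match matchIdxs.getLast? with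
    | some i => [some i, some (n - 1 - i)]
    | none => ([none, none] : List (Option Int))
  let assym := match mismIdxs.getLast? with
    | some i => [some i, some (n - 1 - i)]
    | none => ([none, none] : List (Option Int))
  (sym, assym)

-- ===== PRECONDITION & SPEC =====
def Spec_vilkensortspar (lista : List (Option Int)) (out : List (Option Int) × List (Option Int)) : Prop := out = vilkensortspar_alt lista
instance (lista : List (Option Int)) (out : List (Option Int) × List (Option Int)) : Decidable (Spec_vilkensortspar lista out) := by unfold Spec_vilkensortspar; infer_instance

-- ===== CLAIM (what is proved, stated in full; the proofs are below) =====
def Claim_equal_vilkensortspar : Prop := ∀ (lista : List (Option Int)), Dom_vilkensortspar lista → Spec_vilkensortspar lista (vilkensortspar lista)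

-- ===== LEMMAS AND PROOFS =====

-- classification of index i: the pair A writes into sym (resp. assym) if i is a sym- (asym-) hit
def pvHitS (lista : List (Option Int)) (n i : Int) : Option (List (Option Int)) :=
  match PySem.List.pyGet? lista i with
  | none => none
  | some x =>
    if x = none then none
    else if some x = PySem.List.pyGet? lista (-(i+1)) then some [some i, some (n-(i+1))] else none

def pvHitA (lista : List (Option Int)) (n i : Int) : Option (List (Option Int)) :=
  match PySem.List.pyGet? lista i with
  | none => none
  | some x =>
    if x = none then none
    else if some x = PySem.List.pyGet? lista (-(i+1)) then none else some [some i, some (n-(i+1))]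

theorem pvOr_getD {α : Type} (a b : Option α) (s : α) :
    (a.or b).getD s = a.getD (b.getD s) := by cases a <;> simp

theorem pvHead_singleton {α β : Type} (f : α → Option β) (i : α) :
    (List.filterMap f [i]).head? = f i := by
  cases h : f i <;> simp [h]

theorem pvA_fold (lista : List (Option Int)) (n : Int) (l : List Int)
    (s a : List (Option Int)) :
    l.foldl
      (fun (st : List (Option Int) × List (Option Int)) i =>
        match PySem.List.pyGet? lista i with
        | none => st
        | some x =>
          if x = none then st
          else if some x = PySem.List.pyGet? lista (-(i+1)) then ([some i, some (n-(i+1))], st.2)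
          else (st.1, [some i, some (n-(i+1))])) (s, a)
      = (((l.reverse.filterMap (pvHitS lista n)).head?).getD s,
         ((l.reverse.filterMap (pvHitA lista n)).head?).getD a) := by
  induction l generalizing s a with
  | nil => simp
  | cons i t ih =>
    have hstep :
        (match PySem.List.pyGet? lista i with
          | none => ((s, a) : List (Option Int) × List (Option Int))
          | some x =>
            if x = none then (s, a)
            else if some x = PySem.List.pyGet? lista (-(i+1)) then ([some i, some (n-(i+1))], a)
            else (s, [some i, some (n-(i+1))]))
        = ((pvHitS lista n i).getD s, (pvHitA lista n i).getD a) := by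
      unfold pvHitS pvHitA
      cases PySem.List.pyGet? lista i with
      | none => rfl
      | some x =>
        simp only []
        split_ifs <;> rfl
    rw [List.foldl_cons, hstep, ih, List.reverse_cons,
      List.filterMap_append, List.filterMap_append, List.head?_append, List.head?_append,
      pvHead_singleton, pvHead_singleton, pvOr_getD, pvOr_getD]

-- the half length, as a Nat
theorem pvHalf (m : Nat) : PySem.Int.floordiv (m : Int) 2 = ((m / 2 : Nat) : Int) := by
  exact_mod_cast PySem.Int.floordiv_natCast m 2


theorem pvFilterMap_reverse_head {α β : Type} (f : α → Option β) (l : List α) :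
    (l.reverse.filterMap f).head? = (l.filterMap f).getLast? := by
  rw [List.filterMap_reverse, List.head?_reverse]

-- ===== VERDICT (by name: the statement is the Claim_ definition above) =====
theorem vilkensortspar_spec : Claim_equal_vilkensortspar := by
  intro lista _
  show vilkensortspar lista = vilkensortspar_alt lista
  unfold vilkensortspar vilkensortspar_alt
  simp only [pvHalf, PySem.List.slice_to_natCast]
  rw [pvA_fold]
  set L := lista.length with hL
  set q := L / 2 with hq
  set l := PySem.List.pyRange 0 ((q : Nat) : Int) 1 with hl
  set pairs := (lista.zip lista.reverse).take q with hpairs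
  have hqL : q ≤ L := Nat.div_le_self _ _
  have hplen : pairs.length = q := by
    simp [hpairs, List.length_take, List.length_zip]
    omega
  have henum : PySem.List.enumerate pairs 0
      = l.map (fun j => (j, PySem.List.pyGetD pairs j (none, none))) := by
    rw [PySem.List.enumerate_eq_map_pyRange pairs (none, none)]
    rw [PySem.List.len_eq, hplen]
  rw [henum, List.filterMap_map, List.filterMap_map]
  have hpoint : ∀ j ∈ l, ∃ (k : Nat) (hkq : k < q) (hkL : k < L), j = (k : Int) ∧
      PySem.List.pyGetD pairs j (none, none)
        = (lista[k]'hkL, lista[L - 1 - k]'(by omega)) := by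
    intro j hj
    rw [hl, PySem.List.mem_pyRange_one] at hj
    obtain ⟨k, rfl⟩ := Int.eq_ofNat_of_zero_le hj.1
    have hkq : k < q := by exact_mod_cast hj.2
    refine ⟨k, hkq, by omega, rfl, ?_⟩
    have hk1 : k < pairs.length := by omega
    rw [PySem.List.pyGetD_natCast, List.getD_eq_getElem _ _ hk1]
    have hkz : k < (lista.zip lista.reverse).length := by
      simp [List.length_zip]; omega
    rw [List.getElem_take, List.getElem_zip, List.getElem_reverse]
  have hS : ∀ j ∈ l,
      pvHitS lista (L : Int) j
        = Option.map (fun i => [some i, some ((L : Int) - 1 - i)])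
            ((fun p => if p.2.1 ≠ none ∧ p.2.1 = p.2.2 then some p.1 else none)
              ((fun j => (j, PySem.List.pyGetD pairs j (none, none))) j)) := by
    intro j hj
    obtain ⟨k, hkq, hkL, rfl, hp⟩ := hpoint j hj
    have h1 : PySem.List.pyGet? lista ((k : Int)) = some (lista[k]'hkL) := by
      rw [PySem.List.pyGet?_natCast, List.getElem?_eq_getElem hkL]
    have h2 : PySem.List.pyGet? lista (-((k : Int)+1)) = some (lista[L - 1 - k]'(by omega)) := by
      have hc : -((k : Int)+1) = -(((k+1 : Nat) : Int)) := by push_cast; ring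
      rw [hc, PySem.List.pyGet?_neg_natCast lista (k+1) (by omega) (by omega)]
      have hidx : lista.length - (k+1) = L - 1 - k := by omega
      rw [hidx, List.getElem?_eq_getElem (by omega)]
    simp only [pvHitS, h1, h2, hp]
    have hval : ((L : Int)-((k : Int)+1)) = (L : Int) - 1 - (k : Int) := by ring
    by_cases hn : lista[k]'hkL = none
    · rw [if_pos hn, if_neg (fun h => h.1 hn), Option.map_none]
    · by_cases he : lista[k]'hkL = lista[L - 1 - k]'(by omega)
      · have hsome : some (lista[k]'hkL) = some (lista[L - 1 - k]'(by omega)) := by rw [he]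
        rw [if_neg hn, if_pos hsome, if_pos ⟨hn, he⟩, Option.map_some, hval]
      · have hsome : ¬ some (lista[k]'hkL) = some (lista[L - 1 - k]'(by omega)) := by
          simpa using he
        rw [if_neg hn, if_neg hsome, if_neg (fun h => he h.2), Option.map_none]
  have hA : ∀ j ∈ l,
      pvHitA lista (L : Int) j
        = Option.map (fun i => [some i, some ((L : Int) - 1 - i)])
            ((fun p => if p.2.1 ≠ none ∧ p.2.1 ≠ p.2.2 then some p.1 else none)
              ((fun j => (j, PySem.List.pyGetD pairs j (none, none))) j)) := by
    intro j hj
    obtain ⟨k, hkq, hkL, rfl, hp⟩ := hpoint j hj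
    have h1 : PySem.List.pyGet? lista ((k : Int)) = some (lista[k]'hkL) := by
      rw [PySem.List.pyGet?_natCast, List.getElem?_eq_getElem hkL]
    have h2 : PySem.List.pyGet? lista (-((k : Int)+1)) = some (lista[L - 1 - k]'(by omega)) := by
      have hc : -((k : Int)+1) = -(((k+1 : Nat) : Int)) := by push_cast; ring
      rw [hc, PySem.List.pyGet?_neg_natCast lista (k+1) (by omega) (by omega)]
      have hidx : lista.length - (k+1) = L - 1 - k := by omega
      rw [hidx, List.getElem?_eq_getElem (by omega)]
    simp only [pvHitA, h1, h2, hp]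
    have hval : ((L : Int)-((k : Int)+1)) = (L : Int) - 1 - (k : Int) := by ring
    by_cases hn : lista[k]'hkL = none
    · rw [if_pos hn, if_neg (fun h => h.1 hn), Option.map_none]
    · by_cases he : lista[k]'hkL = lista[L - 1 - k]'(by omega)
      · have hsome : some (lista[k]'hkL) = some (lista[L - 1 - k]'(by omega)) := by rw [he]
        rw [if_neg hn, if_pos hsome, if_neg (fun h => h.2 he), Option.map_none]
      · have hsome : ¬ some (lista[k]'hkL) = some (lista[L - 1 - k]'(by omega)) := by
          simpa using he
        rw [if_neg hn, if_neg hsome, if_pos ⟨hn, he⟩, Option.map_some, hval]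
  rw [pvFilterMap_reverse_head, pvFilterMap_reverse_head,
    List.filterMap_congr hS, List.filterMap_congr hA,
    ← List.map_filterMap, ← List.map_filterMap,
    List.getLast?_map, List.getLast?_map]
  have hfin : ∀ (o o' : Option Int),
      ((Option.map (fun i => [some i, some ((L:Int) - 1 - i)]) o).getD [none, none],
       (Option.map (fun i => [some i, some ((L:Int) - 1 - i)]) o').getD [none, none])
      = ((match o with | some i => [some i, some ((L:Int) - 1 - i)] | none => [none, none]),
         (match o' with | some i => [some i, some ((L:Int) - 1 - i)] | none => [none, none])) := by
    intro o o'
    cases o <;> cases o' <;> rfl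
  exact (hfin _ _).trans (by rfl)
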